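-- pv_equiv track=rewrite | github.com/Scriea/DSA_Problem | Samsung/PRO/points_in_path.py | solve
-- ===== SOURCE A (Python) =====
-- def merge_intervals(intervals):
--     intervals = sorted(intervals)
--     merged_intervals = []
--     for i in range(len(intervals)):
--         if len(merged_intervals)==0:
--             merged_intervals.append(intervals[i])
--         else:
--             top = merged_intervals[-1]
--             if top[1]>=intervals[i][0]:
--                 merged_intervals[-1] = (top[0], max(intervals[i][1], top[1]))
--
--             else:
--                 merged_intervals.append(intervals[i])
--
--     return merged_intervals
--
-- def bin_find(point, bins):
--     l,r = 0, len(bins)-1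
--
--
--     while l<=r:
--         mid = l + (r-l)//2
--         if bins[mid][0]<= point <= bins[mid][1]:
--             return True
--         elif point >bins[mid][1]:
--             l = mid+1
--         else:
--             r = mid-1
--
--     return False
--
-- def solve(n,m, points_x, points_y, edges_x_co, edges_y_co):
--     edges_x, edges_y = {}, {}
--     for i in range(m-1):
--         if edges_x_co[i] == edges_x_co[i+1]:
--             if not edges_x_co[i] in edges_y:
--                 edges_y[edges_x_co[i]] = []
--
--             edges_y[edges_x_co[i]].append((min(edges_y_co[i],edges_y_co[i+1]), max(edges_y_co[i], edges_y_co[i+1])))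
--
--         else:
--             if not edges_y_co[i] in edges_x:
--                 edges_x[edges_y_co[i]] = []
--             edges_x[edges_y_co[i]].append((min(edges_x_co[i],edges_x_co[i+1] ), max(edges_x_co[i+1], edges_x_co[i])))
--
--
--     for key in edges_x.keys():
--         edges_x[key] = merge_intervals(edges_x[key])
--
--     for key in edges_y.keys():
--         edges_y[key] = merge_intervals(edges_y[key])
--
--     count=0
--
--     for i in range(n):
--
--         if points_x[i] in edges_y:
--             if bin_find(points_y[i], edges_y[points_x[i]]):
--                 count+=1
--                 continue
--
--         if points_y[i] in edges_x:
--             if bin_find(points_x[i], edges_x[points_y[i]]):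
--                 count+=1
--                 continue
--
--
--     return count
-- ===== SOURCE B (Python) =====
-- def solve(n, m, points_x, points_y, edges_x_co, edges_y_co):
--     edges_x, edges_y = {}, {}
--     for i in range(m - 1):
--         if edges_x_co[i] == edges_x_co[i + 1]:
--             if not edges_x_co[i] in edges_y:
--                 edges_y[edges_x_co[i]] = []
--             edges_y[edges_x_co[i]].append((min(edges_y_co[i], edges_y_co[i + 1]),
--                                            max(edges_y_co[i], edges_y_co[i + 1])))
--         else:
--             if not edges_y_co[i] in edges_x:
--                 edges_x[edges_y_co[i]] = []
--             edges_x[edges_y_co[i]].append((min(edges_x_co[i], edges_x_co[i + 1]),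
--                                            max(edges_x_co[i + 1], edges_x_co[i])))
--     count = 0
--     for i in range(n):
--         px, py = points_x[i], points_y[i]
--         if any(lo <= py <= hi for lo, hi in edges_y.get(px, ())):
--             count += 1
--         elif any(lo <= px <= hi for lo, hi in edges_x.get(py, ())):
--             count += 1
--     return count
-- ===== Notes on version B (the rewrite author's own statement) =====
-- stated objective: simpler
-- what changed: Removes merge_intervals and bin_find entirely: B keeps the same first pass building the coordinate->intervals dicts, but answers each point query by a plain linear scan of the raw (unsorted, unmerged) interval list instead of sorting, merging overlaps and binary-searching.
import Mathlib
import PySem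

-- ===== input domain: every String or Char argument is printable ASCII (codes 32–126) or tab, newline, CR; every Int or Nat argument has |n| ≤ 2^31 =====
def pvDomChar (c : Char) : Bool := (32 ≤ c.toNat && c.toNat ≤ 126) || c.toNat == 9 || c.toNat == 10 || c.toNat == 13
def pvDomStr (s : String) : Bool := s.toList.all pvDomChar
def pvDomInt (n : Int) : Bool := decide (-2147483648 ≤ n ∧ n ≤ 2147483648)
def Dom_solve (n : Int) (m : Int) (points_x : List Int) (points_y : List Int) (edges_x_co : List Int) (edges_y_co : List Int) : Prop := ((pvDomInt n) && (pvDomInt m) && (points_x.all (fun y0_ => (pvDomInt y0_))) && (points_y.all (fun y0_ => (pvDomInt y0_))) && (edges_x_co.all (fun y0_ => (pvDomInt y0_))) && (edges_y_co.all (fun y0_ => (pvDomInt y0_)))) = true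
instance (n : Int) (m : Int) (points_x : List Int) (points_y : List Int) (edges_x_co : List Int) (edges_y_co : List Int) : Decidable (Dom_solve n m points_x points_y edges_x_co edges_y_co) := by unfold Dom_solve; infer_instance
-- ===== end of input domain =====

-- B replaces A's sort+merge+binary-search on per-coordinate interval lists by a plain
-- linear scan of the raw lists (objective: simpler); the dict-building first pass is shared.

-- ===== PORT A =====

abbrev IvDict := PySem.Dict Int (List (Int × Int))

-- loop body of merge_intervals: merged_intervals[-1] access/update via getLast?/dropLast
def mergeStepA (acc : List (Int × Int)) (x : Int × Int) : List (Int × Int) :=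
  match acc.getLast? with
  | none => acc ++ [x]
  | some top => if top.2 ≥ x.1 then acc.dropLast ++ [(top.1, max x.2 top.2)] else acc ++ [x]

def merge_intervals (intervals : List (Int × Int)) : List (Int × Int) :=
  (PySem.List.sorted2 intervals Prod.fst Prod.snd).foldl mergeStepA []

-- the while-loop of bin_find; the `none` branch is a totality guard only
-- (Python would raise IndexError there; it is unreachable since 0 ≤ l ≤ mid ≤ r < len at every call)
def binFindAux (point : Int) (bins : List (Int × Int)) (l r : Int) : Bool :=
  if hlr : l ≤ r then
    let mid := l + PySem.Int.floordiv (r - l) 2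
    match PySem.List.pyGet? bins mid with
    | none => false
    | some iv =>
      if iv.1 ≤ point ∧ point ≤ iv.2 then true
      else if point > iv.2 then binFindAux point bins (mid + 1) r
      else binFindAux point bins l (mid - 1)
  else false
termination_by (r + 1 - l).toNat
decreasing_by
  · simp only [PySem.Int.floordiv_eq_ediv_of_pos (show (0:Int) < 2 by norm_num)]
    omega
  · simp only [PySem.Int.floordiv_eq_ediv_of_pos (show (0:Int) < 2 by norm_num)]
    omega

def bin_find (point : Int) (bins : List (Int × Int)) : Bool :=
  binFindAux point bins 0 (PySem.List.len bins - 1)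

-- body of `for i in range(m-1)` building edges_x / edges_y (st = (edges_x, edges_y));
-- Pre_solve keeps every index in range, so pyGetD's default is never used
def buildStep (exco eyco : List Int) (st : IvDict × IvDict) (i : Int) : IvDict × IvDict :=
  let xi := PySem.List.pyGetD exco i 0
  let xi1 := PySem.List.pyGetD exco (i + 1) 0
  let yi := PySem.List.pyGetD eyco i 0
  let yi1 := PySem.List.pyGetD eyco (i + 1) 0
  if xi = xi1 then
    let ey := if st.2.contains xi then st.2 else st.2.insert xi []
    (st.1, ey.modify xi [] (fun ivs => ivs ++ [(min yi yi1, max yi yi1)]))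
  else
    let ex := if st.1.contains yi then st.1 else st.1.insert yi []
    (ex.modify yi [] (fun ivs => ivs ++ [(min xi xi1, max xi1 xi)]), st.2)

def buildDicts (m : Int) (exco eyco : List Int) : IvDict × IvDict :=
  (PySem.List.pyRange 0 (m - 1) 1).foldl (buildStep exco eyco) (PySem.Dict.empty, PySem.Dict.empty)

-- `for key in d: d[key] = merge_intervals(d[key])`: in-place value update keeps the key order
def mapValuesMerge (d : IvDict) : IvDict :=
  PySem.Dict.mk (d.items.map (fun kv => (kv.1, merge_intervals kv.2)))

def solve (n : Int) (m : Int) (points_x : List Int) (points_y : List Int) (edges_x_co : List Int) (edges_y_co : List Int) : Int :=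
  let st := buildDicts m edges_x_co edges_y_co
  let ex := mapValuesMerge st.1
  let ey := mapValuesMerge st.2
  (PySem.List.pyRange 0 n 1).foldl (fun count i =>
    let px := PySem.List.pyGetD points_x i 0
    let py := PySem.List.pyGetD points_y i 0
    let hit1 := match ey.get? px with | some bins => bin_find py bins | none => false
    if hit1 then count + 1
    else
      let hit2 := match ex.get? py with | some bins => bin_find px bins | none => false
      if hit2 then count + 1 else count) 0

-- ===== PORT B =====

-- first pass of Source B: same dict building as A (B keeps it on purpose)
def buildStepB (exco eyco : List Int) (st : IvDict × IvDict) (i : Int) : IvDict × IvDict :=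
  let xi := PySem.List.pyGetD exco i 0
  let xi1 := PySem.List.pyGetD exco (i + 1) 0
  let yi := PySem.List.pyGetD eyco i 0
  let yi1 := PySem.List.pyGetD eyco (i + 1) 0
  if xi = xi1 then
    let ey := if st.2.contains xi then st.2 else st.2.insert xi []
    (st.1, ey.modify xi [] (fun ivs => ivs ++ [(min yi yi1, max yi yi1)]))
  else
    let ex := if st.1.contains yi then st.1 else st.1.insert yi []
    (ex.modify yi [] (fun ivs => ivs ++ [(min xi xi1, max xi1 xi)]), st.2)

def buildDictsB (m : Int) (exco eyco : List Int) : IvDict × IvDict :=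
  (PySem.List.pyRange 0 (m - 1) 1).foldl (buildStepB exco eyco) (PySem.Dict.empty, PySem.Dict.empty)

-- `any(lo <= p <= hi for lo, hi in ivs)`
def anyContains (p : Int) (ivs : List (Int × Int)) : Bool :=
  ivs.any (fun iv => decide (iv.1 ≤ p) && decide (p ≤ iv.2))

def solve_alt (n : Int) (m : Int) (points_x : List Int) (points_y : List Int) (edges_x_co : List Int) (edges_y_co : List Int) : Int :=
  let st := buildDictsB m edges_x_co edges_y_co
  (PySem.List.pyRange 0 n 1).foldl (fun count i =>
    let px := PySem.List.pyGetD points_x i 0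
    let py := PySem.List.pyGetD points_y i 0
    if anyContains py (st.2.getD px []) then count + 1
    else if anyContains px (st.1.getD py []) then count + 1
    else count) 0

-- ===== PRECONDITION & SPEC =====
-- Pre_solve excludes exactly the inputs where A raises IndexError: lists shorter than the
-- counts n / m it is told to index through.
def Pre_solve (n : Int) (m : Int) (points_x : List Int) (points_y : List Int) (edges_x_co : List Int) (edges_y_co : List Int) : Prop :=
  (1 < m → m ≤ (edges_x_co.length : Int) ∧ m ≤ (edges_y_co.length : Int)) ∧
  (0 < n → n ≤ (points_x.length : Int) ∧ n ≤ (points_y.length : Int))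
instance (n : Int) (m : Int) (points_x : List Int) (points_y : List Int) (edges_x_co : List Int) (edges_y_co : List Int) : Decidable (Pre_solve n m points_x points_y edges_x_co edges_y_co) := by unfold Pre_solve; infer_instance

def pvWitness_solve : Int × Int × List Int × List Int × List Int × List Int := (1, 2, [0], [0], [0, 0], [0, 1])

def Spec_solve (n : Int) (m : Int) (points_x : List Int) (points_y : List Int) (edges_x_co : List Int) (edges_y_co : List Int) (out : Int) : Prop := out = solve_alt n m points_x points_y edges_x_co edges_y_co
instance (n : Int) (m : Int) (points_x : List Int) (points_y : List Int) (edges_x_co : List Int) (edges_y_co : List Int) (out : Int) : Decidable (Spec_solve n m points_x points_y edges_x_co edges_y_co out) := by unfold Spec_solve; infer_instance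

-- ===== CLAIM (what is proved, stated in full; the proofs are below) =====
def Claim_equal_solve : Prop := ∀ (n : Int) (m : Int) (points_x : List Int) (points_y : List Int) (edges_x_co : List Int) (edges_y_co : List Int), Dom_solve n m points_x points_y edges_x_co edges_y_co → Pre_solve n m points_x points_y edges_x_co edges_y_co → Spec_solve n m points_x points_y edges_x_co edges_y_co (solve n m points_x points_y edges_x_co edges_y_co)

-- ===== LEMMAS AND PROOFS =====

def LexLe (a b : Int × Int) : Prop := a.1 < b.1 ∨ (a.1 = b.1 ∧ a.2 ≤ b.2)
def ChainRel (a b : Int × Int) : Prop := a.2 < b.1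
def Proper (l : List (Int × Int)) : Prop := ∀ iv ∈ l, iv.1 ≤ iv.2

def ltB (a b : Int × Int) : Bool :=
  decide (a.1 < b.1) || (!decide (b.1 < a.1) && decide (a.2 < b.2))

lemma sorted2_eq_foldl (xs : List (Int × Int)) :
    PySem.List.sorted2 xs Prod.fst Prod.snd =
      xs.foldl (fun acc x => PySem.List.insertBy ltB x acc) [] := rfl

lemma lexLe_trans {a b c : Int × Int} (h1 : LexLe a b) (h2 : LexLe b c) : LexLe a c := by
  unfold LexLe at *; omega

lemma ltB_true {a b : Int × Int} (h : ltB a b = true) : LexLe a b := by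
  simp [ltB] at h; unfold LexLe; omega

lemma ltB_false {a b : Int × Int} (h : ltB a b = false) : LexLe b a := by
  simp [ltB] at h; unfold LexLe; omega

lemma insertBy_lex_pairwise (x : Int × Int) (ys : List (Int × Int))
    (h : ys.Pairwise LexLe) : (PySem.List.insertBy ltB x ys).Pairwise LexLe := by
  induction ys with
  | nil => simp [PySem.List.insertBy]
  | cons y ys ih =>
    rw [List.pairwise_cons] at h
    obtain ⟨hy, hys⟩ := h
    by_cases hxy : ltB x y = true
    · rw [show PySem.List.insertBy ltB x (y :: ys) = x :: y :: ys by simp [PySem.List.insertBy, hxy]]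
      refine List.Pairwise.cons ?_ (List.Pairwise.cons hy hys)
      intro z hz
      rcases List.mem_cons.mp hz with rfl | hz
      · exact ltB_true hxy
      · exact lexLe_trans (ltB_true hxy) (hy _ hz)
    · rw [show PySem.List.insertBy ltB x (y :: ys) = y :: PySem.List.insertBy ltB x ys by
        simp [PySem.List.insertBy, hxy]]
      refine List.Pairwise.cons ?_ (ih hys)
      intro z hz
      rw [PySem.List.insertBy_mem_iff] at hz
      rcases hz with rfl | hz
      · exact ltB_false (by simpa using hxy)
      · exact hy _ hz

lemma sorted2_pairwise_lex (xs : List (Int × Int)) :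
    (PySem.List.sorted2 xs Prod.fst Prod.snd).Pairwise LexLe := by
  rw [sorted2_eq_foldl]
  have : ∀ (l : List (Int × Int)) (acc : List (Int × Int)), acc.Pairwise LexLe →
      (l.foldl (fun acc x => PySem.List.insertBy ltB x acc) acc).Pairwise LexLe := by
    intro l
    induction l with
    | nil => intro acc h; exact h
    | cons x l ih => intro acc h; exact ih _ (insertBy_lex_pairwise x acc h)
  exact this xs [] (by simp)

lemma lexLe_fst {a b : Int × Int} (h : LexLe a b) : a.1 ≤ b.1 := by unfold LexLe at h; omega

lemma mergeLoop_spec (rem : List (Int × Int)) :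
    ∀ acc : List (Int × Int),
    rem.Pairwise LexLe → Proper rem →
    acc.Pairwise ChainRel → Proper acc →
    (∀ top, acc.getLast? = some top → ∀ y ∈ rem, top.1 ≤ y.1) →
    (rem.foldl mergeStepA acc).Pairwise ChainRel ∧ Proper (rem.foldl mergeStepA acc) ∧
      ∀ p, anyContains p (rem.foldl mergeStepA acc) = (anyContains p acc || anyContains p rem) := by
  induction rem with
  | nil =>
    intro acc _ _ hc hp _
    exact ⟨hc, hp, fun p => by simp [anyContains]⟩
  | cons x rest ih =>
    intro acc hlex hprem hc hp hlink
    rw [List.pairwise_cons] at hlex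
    obtain ⟨hxrest, hlexrest⟩ := hlex
    have hxprop : x.1 ≤ x.2 := hprem x (by simp)
    have hprest : Proper rest := fun iv hiv => hprem iv (by simp [hiv])
    simp only [List.foldl_cons]
    rcases List.eq_nil_or_concat acc with hnil | ⟨ys, top, rfl⟩
    · subst hnil
      have hstep : mergeStepA [] x = [x] := by simp [mergeStepA]
      rw [hstep]
      obtain ⟨h1, h2, h3⟩ := ih [x] hlexrest hprest (by simp)
        (fun iv hiv => by simp at hiv; subst hiv; exact hxprop)
        (fun t ht y hy => by
          simp at ht; subst ht; exact lexLe_fst (hxrest y hy))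
      refine ⟨h1, h2, fun p => ?_⟩
      rw [h3 p]; simp [anyContains]
    · rw [List.concat_eq_append] at *
      have hlast : (ys ++ [top]).getLast? = some top := by simp
      rw [List.pairwise_append] at hc
      obtain ⟨hcys, -, htopy⟩ := hc
      have htopy' : ∀ a ∈ ys, a.2 < top.1 := fun a ha => htopy a ha top (by simp)
      have htopx1 : top.1 ≤ x.1 := hlink top hlast x (by simp)
      have htopprop : top.1 ≤ top.2 := hp top (by simp)
      have hpys : Proper ys := fun iv hiv => hp iv (by simp [hiv])
      by_cases hm : top.2 ≥ x.1
      · have hstep : mergeStepA (ys ++ [top]) x = ys ++ [(top.1, max x.2 top.2)] := by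
          simp [mergeStepA, hlast, hm]
        rw [hstep]
        obtain ⟨h1, h2, h3⟩ := ih (ys ++ [(top.1, max x.2 top.2)]) hlexrest hprest
          (by
            rw [List.pairwise_append]
            exact ⟨hcys, by simp, fun a ha b hb => by
              simp at hb; subst hb; exact htopy' a ha⟩)
          (fun iv hiv => by
            rcases List.mem_append.mp hiv with h | h
            · exact hpys iv h
            · simp at h; subst h; exact le_trans htopprop (le_max_right _ _))
          (fun t ht y hy => by
            simp at ht
            have ht1 : t.1 = top.1 := by rw [← ht]
            rw [ht1]
            exact le_trans htopx1 (lexLe_fst (hxrest y hy)))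
        refine ⟨h1, h2, fun p => ?_⟩
        rw [h3 p]
        have hcont : (decide (top.1 ≤ p) && decide (p ≤ max x.2 top.2)) =
            ((decide (top.1 ≤ p) && decide (p ≤ top.2)) || (decide (x.1 ≤ p) && decide (p ≤ x.2))) := by
          apply Bool.eq_iff_iff.mpr
          simp only [Bool.or_eq_true, Bool.and_eq_true, decide_eq_true_eq]
          omega
        apply Bool.eq_iff_iff.mpr
        simp only [anyContains, List.any_append, List.any_cons, List.any_nil, Bool.or_eq_true,
          Bool.or_false]
        rw [hcont]
        simp only [Bool.or_eq_true]
        tauto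
      · have hstep : mergeStepA (ys ++ [top]) x = (ys ++ [top]) ++ [x] := by
          simp [mergeStepA, hlast, hm]
        rw [hstep]
        obtain ⟨h1, h2, h3⟩ := ih ((ys ++ [top]) ++ [x]) hlexrest hprest
          (by
            rw [List.pairwise_append]
            refine ⟨by rw [List.pairwise_append]; exact ⟨hcys, by simp, htopy⟩, by simp,
              fun a ha b hb => ?_⟩
            simp at hb; subst hb
            rcases List.mem_append.mp ha with h | h
            · exact lt_trans (lt_of_lt_of_le (htopy' a h) htopprop) (by omega)
            · simp at h; subst h; unfold ChainRel; omega)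
          (fun iv hiv => by
            rcases List.mem_append.mp hiv with h | h
            · exact hp iv h
            · simp at h; subst h; exact hxprop)
          (fun t ht y hy => by
            simp at ht; subst ht; exact lexLe_fst (hxrest y hy))
        refine ⟨h1, h2, fun p => ?_⟩
        rw [h3 p]
        simp [anyContains, Bool.or_assoc]

lemma binFindAux_spec (p : Int) (M : List (Int × Int)) (hc : M.Pairwise ChainRel) (hp : Proper M) :
    ∀ l r : Int, 0 ≤ l → r < (M.length : Int) →
    (binFindAux p M l r = true ↔
      ∃ i : Nat, l ≤ (i : Int) ∧ (i : Int) ≤ r ∧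
        ∃ iv, M[i]? = some iv ∧ iv.1 ≤ p ∧ p ≤ iv.2) := by
  have hmono := List.pairwise_iff_getElem.mp hc
  intro l r
  induction l, r using binFindAux.induct p M with
  | case1 l r hlr mid hnone =>
    intro hl hr
    exfalso
    rw [PySem.List.pyGet?_eq_none_iff] at hnone
    apply hnone
    constructor <;>
      [skip; skip] <;>
      · simp only [mid, PySem.Int.floordiv_eq_ediv_of_pos (show (0:Int) < 2 by norm_num)] at *
        omega
  | case2 l r hlr mid iv hget hhit =>
    intro hl hr
    have hmid : 0 ≤ mid ∧ mid ≤ r := by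
      constructor <;>
        · simp only [mid, PySem.Int.floordiv_eq_ediv_of_pos (show (0:Int) < 2 by norm_num)] at *
          omega
    have hlm : l ≤ mid := by
      simp only [mid, PySem.Int.floordiv_eq_ediv_of_pos (show (0:Int) < 2 by norm_num)] at *
      omega
    rw [binFindAux]
    simp only [dif_pos hlr]
    rw [show (l + PySem.Int.floordiv (r - l) 2) = mid from rfl, hget]
    simp only [if_pos hhit]
    constructor
    · intro _
      have hget' : M[mid.toNat]? = some iv := by
        rw [PySem.List.pyGet?_of_nonneg M hmid.1] at hget; exact hget
      exact ⟨mid.toNat, by omega, by omega, iv, hget', hhit.1, hhit.2⟩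
    · intro _; trivial
  | case3 l r hlr mid iv hget hmiss hgt ih =>
    intro hl hr
    have hmid : 0 ≤ mid ∧ l ≤ mid ∧ mid ≤ r := by
      refine ⟨?_, ?_, ?_⟩ <;>
        · simp only [mid, PySem.Int.floordiv_eq_ediv_of_pos (show (0:Int) < 2 by norm_num)] at *
          omega
    have hget' : M[mid.toNat]? = some iv := by
      rw [PySem.List.pyGet?_of_nonneg M hmid.1] at hget; exact hget
    have hivm : M[mid.toNat]'(by have := (List.getElem?_eq_some_iff).mp hget'; omega) = iv := by
      have := (List.getElem?_eq_some_iff).mp hget'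
      obtain ⟨h, heq⟩ := this; exact heq
    have hmlen : mid.toNat < M.length := by
      have := (List.getElem?_eq_some_iff).mp hget'; omega
    rw [binFindAux]
    simp only [dif_pos hlr]
    rw [show (l + PySem.Int.floordiv (r - l) 2) = mid from rfl, hget]
    simp only [if_neg hmiss, if_pos hgt]
    rw [ih (by omega) hr]
    constructor
    · rintro ⟨i, h1, h2, iv', hgi, hc1, hc2⟩
      exact ⟨i, by omega, h2, iv', hgi, hc1, hc2⟩
    · rintro ⟨i, h1, h2, iv', hgi, hc1, hc2⟩
      refine ⟨i, ?_, h2, iv', hgi, hc1, hc2⟩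
      obtain ⟨hilen, hivi⟩ := (List.getElem?_eq_some_iff).mp hgi
      by_contra hcon
      push Not at hcon
      rcases Nat.lt_or_ge i mid.toNat with hlt | hge
      · have hch := hmono i mid.toNat hilen hmlen hlt
        have hpm : iv.1 ≤ iv.2 := hp iv (hivm ▸ List.getElem_mem hmlen)
        unfold ChainRel at hch
        rw [hivi, hivm] at hch
        omega
      · have hieq : i = mid.toNat := by omega
        subst hieq
        rw [hivm] at hivi
        subst hivi
        omega
    
  | case4 l r hlr mid iv hget hmiss hngt ih =>
    intro hl hr
    have hmid : 0 ≤ mid ∧ l ≤ mid ∧ mid ≤ r := by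
      refine ⟨?_, ?_, ?_⟩ <;>
        · simp only [mid, PySem.Int.floordiv_eq_ediv_of_pos (show (0:Int) < 2 by norm_num)] at *
          omega
    have hget' : M[mid.toNat]? = some iv := by
      rw [PySem.List.pyGet?_of_nonneg M hmid.1] at hget; exact hget
    obtain ⟨hmlen, hivm⟩ := (List.getElem?_eq_some_iff).mp hget'
    have hplt : p < iv.1 := by
      push Not at hngt
      rcases not_and_or.mp hmiss with h | h <;> omega
    rw [binFindAux]
    simp only [dif_pos hlr]
    rw [show (l + PySem.Int.floordiv (r - l) 2) = mid from rfl, hget]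
    simp only [if_neg hmiss, if_neg (by omega : ¬ p > iv.2)]
    rw [ih hl (by omega)]
    constructor
    · rintro ⟨i, h1, h2, iv', hgi, hc1, hc2⟩
      exact ⟨i, h1, by omega, iv', hgi, hc1, hc2⟩
    · rintro ⟨i, h1, h2, iv', hgi, hc1, hc2⟩
      refine ⟨i, h1, ?_, iv', hgi, hc1, hc2⟩
      obtain ⟨hilen, hivi⟩ := (List.getElem?_eq_some_iff).mp hgi
      by_contra hcon
      push Not at hcon
      rcases Nat.lt_or_ge mid.toNat i with hlt | hge
      · have hch := hmono mid.toNat i hmlen hilen hlt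
        unfold ChainRel at hch
        rw [hivi, hivm] at hch
        have hngt' : ¬ p > iv.2 := by push Not at hngt; omega
        omega
      · have hieq : i = mid.toNat := by omega
        subst hieq
        rw [hivm] at hivi
        subst hivi
        omega
    
  | case5 l r hlr =>
    intro hl hr
    rw [binFindAux]
    simp only [dif_neg hlr]
    constructor
    · intro h; cases h
    · rintro ⟨i, h1, h2, -⟩; omega

lemma bin_find_eq_any (p : Int) (M : List (Int × Int)) (hc : M.Pairwise ChainRel) (hp : Proper M) :
    bin_find p M = anyContains p M := by
  apply Bool.eq_iff_iff.mpr
  rw [bin_find, PySem.List.len_eq,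
    binFindAux_spec p M hc hp 0 ((M.length : Int) - 1) le_rfl (by omega)]
  simp only [anyContains, List.any_eq_true, Bool.and_eq_true, decide_eq_true_eq]
  constructor
  · rintro ⟨i, h1, h2, iv, hgi, hc1, hc2⟩
    obtain ⟨hilen, hivi⟩ := (List.getElem?_eq_some_iff).mp hgi
    exact ⟨iv, hivi ▸ List.getElem_mem hilen, hc1, hc2⟩
  · rintro ⟨iv, hmem, hc1, hc2⟩
    obtain ⟨i, hilen, hivi⟩ := List.mem_iff_getElem.mp hmem
    exact ⟨i, by omega, by omega, iv, by rw [List.getElem?_eq_getElem hilen, hivi], hc1, hc2⟩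

lemma get?_mapValuesMerge (d : IvDict) (k : Int) :
    (mapValuesMerge d).get? k = (d.get? k).map merge_intervals := by
  cases d with
  | mk items =>
    simp only [mapValuesMerge, PySem.Dict.get?]
    induction items with
    | nil => simp
    | cons a l ih =>
      by_cases h : a.1 == k
      · simp [List.find?, h]
      · simp only [List.map_cons, List.find?, h]
        simpa using ih


lemma proper_append_one (l : List (Int × Int)) (iv : Int × Int) (h : Proper l)
    (hiv : iv.1 ≤ iv.2) : Proper (l ++ [iv]) := by
  intro iv' hiv'
  rcases List.mem_append.mp hiv' with h' | h'
  · exact h iv' h'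
  · simp at h'; subst h'; exact hiv

lemma proper_getD_insert_nil (d : IvDict) (k0 k : Int) (h : ∀ k, Proper (d.getD k []))
    : Proper ((d.insert k0 []).getD k []) := by
  rw [PySem.Dict.getD_insert]
  split_ifs with h'
  · intro iv hiv; cases hiv
  · exact h k

lemma buildStep_inv (exco eyco : List Int) (st : IvDict × IvDict) (i : Int)
    (h : ∀ k, Proper (st.1.getD k []) ∧ Proper (st.2.getD k [])) :
    ∀ k, Proper ((buildStep exco eyco st i).1.getD k []) ∧
         Proper ((buildStep exco eyco st i).2.getD k []) := by
  intro k
  unfold buildStep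
  by_cases hc : PySem.List.pyGetD exco i 0 = PySem.List.pyGetD exco (i + 1) 0
  · rw [if_pos hc]
    refine ⟨(h k).1, ?_⟩
    rw [PySem.Dict.getD_modify]
    have hins : ∀ k', Proper ((if st.2.contains (PySem.List.pyGetD exco i 0) then st.2
        else st.2.insert (PySem.List.pyGetD exco i 0) []).getD k' []) := by
      intro k'
      by_cases hc2 : st.2.contains (PySem.List.pyGetD exco i 0)
      · rw [if_pos hc2]; exact (h k').2
      · rw [if_neg hc2]; exact proper_getD_insert_nil _ _ _ (fun k'' => (h k'').2)
    by_cases hk : k = PySem.List.pyGetD exco i 0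
    · rw [if_pos hk]; exact proper_append_one _ _ (hins _) (by omega)
    · rw [if_neg hk]; exact hins k
  · rw [if_neg hc]
    refine ⟨?_, (h k).2⟩
    rw [PySem.Dict.getD_modify]
    have hins : ∀ k', Proper ((if st.1.contains (PySem.List.pyGetD eyco i 0) then st.1
        else st.1.insert (PySem.List.pyGetD eyco i 0) []).getD k' []) := by
      intro k'
      by_cases hc2 : st.1.contains (PySem.List.pyGetD eyco i 0)
      · rw [if_pos hc2]; exact (h k').1
      · rw [if_neg hc2]; exact proper_getD_insert_nil _ _ _ (fun k'' => (h k'').1)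
    by_cases hk : k = PySem.List.pyGetD eyco i 0
    · rw [if_pos hk]; exact proper_append_one _ _ (hins _) (by omega)
    · rw [if_neg hk]; exact hins k

lemma proper_buildDicts (m : Int) (exco eyco : List Int) :
    ∀ k, Proper ((buildDicts m exco eyco).1.getD k []) ∧ Proper ((buildDicts m exco eyco).2.getD k []) := by
  unfold buildDicts
  have gen : ∀ (is : List Int) (st : IvDict × IvDict),
      (∀ k, Proper (st.1.getD k []) ∧ Proper (st.2.getD k [])) →
      ∀ k, Proper ((is.foldl (buildStep exco eyco) st).1.getD k []) ∧
           Proper ((is.foldl (buildStep exco eyco) st).2.getD k []) := by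
    intro is
    induction is with
    | nil => intro st h; exact h
    | cons i is ih => intro st h; exact ih _ (buildStep_inv exco eyco st i h)
  apply gen
  intro k
  constructor <;> · rw [PySem.Dict.getD_empty]; intro iv hiv; cases hiv


lemma buildDictsB_eq (m : Int) (exco eyco : List Int) :
    buildDictsB m exco eyco = buildDicts m exco eyco := rfl

lemma merge_chain_proper_any (bins : List (Int × Int)) (hp : Proper bins) :
    (merge_intervals bins).Pairwise ChainRel ∧ Proper (merge_intervals bins) ∧
      ∀ p, anyContains p (merge_intervals bins) = anyContains p bins := by
  have hperm := PySem.List.sorted2_perm bins Prod.fst Prod.snd false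
  have hpS : Proper (PySem.List.sorted2 bins Prod.fst Prod.snd) :=
    fun iv h => hp iv (hperm.mem_iff.mp h)
  obtain ⟨h1, h2, h3⟩ := mergeLoop_spec (PySem.List.sorted2 bins Prod.fst Prod.snd) []
    (sorted2_pairwise_lex bins) hpS (by simp) (by intro iv h; simp at h) (by intro t ht; simp at ht)
  refine ⟨h1, h2, fun p => ?_⟩
  rw [show merge_intervals bins = (PySem.List.sorted2 bins Prod.fst Prod.snd).foldl mergeStepA []
      from rfl, h3 p]
  rw [show anyContains p [] = false from rfl, Bool.false_or]
  exact hperm.any_eq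

lemma bin_find_merge (p : Int) (bins : List (Int × Int)) (hp : Proper bins) :
    bin_find p (merge_intervals bins) = anyContains p bins := by
  obtain ⟨h1, h2, h3⟩ := merge_chain_proper_any bins hp
  rw [bin_find_eq_any p _ h1 h2, h3 p]


-- ===== VERDICT (by name: the statement is the Claim_ definition above) =====
theorem solve_spec : Claim_equal_solve := by
  unfold Claim_equal_solve
  intro n m points_x points_y edges_x_co edges_y_co _ _
  unfold Spec_solve
  simp only [solve, solve_alt, buildDictsB_eq]
  refine PySem.List.foldl_congr_mem _ _ _ _ ?_
  intro count i _
  dsimp only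
  have hmatch : ∀ (d : IvDict) (q v : Int),
      (∀ k, Proper (d.getD k [])) →
      (match (mapValuesMerge d).get? q with
        | some bins => bin_find v bins
        | none => false)
      = anyContains v (d.getD q []) := by
    intro d q v hprop
    rw [get?_mapValuesMerge]
    cases hget : d.get? q with
    | none =>
      rw [PySem.Dict.getD_of_get?_eq_none d [] hget]
      rfl
    | some raw =>
      have hraw : d.getD q [] = raw := PySem.Dict.getD_of_get?_eq_some d [] hget
      rw [hraw]
      exact bin_find_merge v raw (hraw ▸ hprop q)
  have hPB := proper_buildDicts m edges_x_co edges_y_co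
  rw [hmatch (buildDicts m edges_x_co edges_y_co).2
        (PySem.List.pyGetD points_x i 0) (PySem.List.pyGetD points_y i 0)
        (fun k => (hPB k).2),
      hmatch (buildDicts m edges_x_co edges_y_co).1
        (PySem.List.pyGetD points_y i 0) (PySem.List.pyGetD points_x i 0)
        (fun k => (hPB k).1)]
  rfl
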